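-- pv_equiv track=rewrite | github.com/johnholman/omr-algorithms | code/simulator/reporting/figs.py | expand_linespec
-- ===== SOURCE A (Python) =====
-- def expand_linespec(spec):
--     lspecs = []
--     for name, values in spec.items():
--         lspecs.append([{name: value} for value in values])
--     spec1 = []
--     for dicts in zip(*lspecs):
--         merged_dicts = {}
--         for d in dicts:
--             merged_dicts = {**merged_dicts, **d}
--         spec1.append(merged_dicts)
--     return spec1
-- ===== SOURCE B (Python) =====
-- def expand_linespec(spec):
--     n = min((len(vs) for vs in spec.values()), default=0)
--     return [{k: vs[i] for k, vs in spec.items()} for i in range(n)]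
-- ===== Notes on version B (the rewrite author's own statement) =====
-- stated objective: faster
-- what changed: B computes the minimum value-list length n once and builds row i by direct indexing ({k: vs[i]} for i in range(n)), replacing A's construction of per-key lists of singleton dicts, the n-ary zip transposition, and the inner merge loop whose {**merged, **d} copies the growing dict once per key.
import Mathlib
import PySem

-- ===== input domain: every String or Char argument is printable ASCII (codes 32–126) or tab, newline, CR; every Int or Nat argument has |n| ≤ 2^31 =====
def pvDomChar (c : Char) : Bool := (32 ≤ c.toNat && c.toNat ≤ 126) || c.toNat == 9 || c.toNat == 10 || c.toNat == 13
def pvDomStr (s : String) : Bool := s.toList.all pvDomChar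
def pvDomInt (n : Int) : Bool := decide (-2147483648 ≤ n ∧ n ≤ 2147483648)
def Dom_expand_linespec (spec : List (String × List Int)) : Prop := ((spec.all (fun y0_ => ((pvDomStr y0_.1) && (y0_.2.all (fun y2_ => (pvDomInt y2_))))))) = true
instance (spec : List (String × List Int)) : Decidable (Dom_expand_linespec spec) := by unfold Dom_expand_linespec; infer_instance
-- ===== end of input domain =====

-- B replaces A's build-singleton-dicts / zip-transpose / merge pipeline (whose {**merged, **d}
-- copies the growing dict once per key) by computing the minimum value-list length once and
-- building each row by direct indexing (objective: faster; measured).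

-- ===== PORT A =====
-- transliteration of Python's n-ary zip(*ls): emit a row of heads until some list runs out
def pyZipStarGo {α : Type} : List α → List (List α) → List (List α)
  | [], _ => []
  | x :: xs, rest =>
    match rest.mapM List.head? with
    | none => []
    | some hs => (x :: hs) :: pyZipStarGo xs (rest.map List.tail)

def pyZipStar {α : Type} : List (List α) → List (List α)
  | [] => []       -- zip() of no iterables is empty
  | l :: rest => pyZipStarGo l rest

def expand_linespec (spec : List (String × List Int)) : List (List (String × Int)) :=
  -- lspecs: for each (name, values), the list of singleton dicts {name: value}
  let lspecs := spec.map (fun p => p.2.map (fun v => PySem.Dict.mk [(p.1, v)]))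
  -- for dicts in zip(*lspecs): merged = {}; for d in dicts: merged = {**merged, **d}
  (pyZipStar lspecs).map (fun dicts =>
    (dicts.foldl (fun m d => d.items.foldl (fun m kv => m.insert kv.1 kv.2) m)
      (PySem.Dict.empty : PySem.Dict String Int)).items)

-- ===== PORT B =====
def expand_linespec_alt (spec : List (String × List Int)) : List (List (String × Int)) :=
  -- n = min((len(vs) for vs in spec.values()), default=0)
  let n : Nat := ((spec.map (fun p => p.2.length)).min?).getD 0
  -- [{k: vs[i] for k, vs in spec.items()} for i in range(n)]; vs[i] ported as getD i 0,
  -- exact because i < n ≤ len(vs) for every value list vs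
  (List.range n).map (fun i =>
    (spec.foldl (fun m p => m.insert p.1 (p.2.getD i 0))
      (PySem.Dict.empty : PySem.Dict String Int)).items)

-- ===== PRECONDITION & SPEC =====
def Spec_expand_linespec (spec : List (String × List Int)) (out : List (List (String × Int))) : Prop := out = expand_linespec_alt spec
instance (spec : List (String × List Int)) (out : List (List (String × Int))) : Decidable (Spec_expand_linespec spec out) := by unfold Spec_expand_linespec; infer_instance

-- ===== CLAIM (what is proved, stated in full; the proofs are below) =====
def Claim_equal_expand_linespec : Prop := ∀ (spec : List (String × List Int)), Dom_expand_linespec spec → Spec_expand_linespec spec (expand_linespec spec)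

-- ===== LEMMAS AND PROOFS =====

-- min?.getD 0 of a list of Nats containing 0 is 0
theorem min?_getD_zero_of_mem {ns : List Nat} (h : 0 ∈ ns) : (ns.min?).getD 0 = 0 := by
  cases hm : ns.min? with
  | none => rfl
  | some m =>
    have := (List.min?_eq_some_iff.mp hm).2 0 h
    simp only [Option.getD_some]
    omega

-- min?.getD 0 commutes with +1 applied pointwise (nonempty list)
theorem min?_getD_map_succ (a : Nat) (ns : List Nat) :
    (((a :: ns).map (fun n => n + 1)).min?).getD 0 = ((a :: ns).min?).getD 0 + 1 := by
  cases hm : (a :: ns).min? with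
  | none => exact absurd hm (by simp)
  | some m =>
    obtain ⟨hmem, hle⟩ := List.min?_eq_some_iff.mp hm
    have : ((a :: ns).map (fun n => n + 1)).min? = some (m + 1) := by
      refine List.min?_eq_some_iff.mpr ⟨List.mem_map.mpr ⟨m, hmem, rfl⟩, ?_⟩
      intro b hb
      obtain ⟨n, hn, rfl⟩ := List.mem_map.mp hb
      exact Nat.add_le_add_right (hle n hn) 1
    simp only [this, Option.getD_some]

theorem mapM_head?_eq_none {α : Type} {rest : List (List α)} :
    rest.mapM List.head? = none ↔ [] ∈ rest := by
  induction rest with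
  | nil => simp
  | cons r t ih =>
    cases r with
    | nil => simp
    | cons x xs =>
      simp only [List.mapM_cons, List.head?_cons]
      constructor
      · intro h
        cases ht : t.mapM List.head? with
        | none => exact List.mem_cons_of_mem _ (ih.mp ht)
        | some hs => simp [ht] at h
      · intro h
        rcases List.mem_cons.mp h with h | h
        · exact absurd h (by simp)
        · rw [ih.mpr h]; rfl

theorem mapM_head?_eq_some {α : Type} (d : α) {rest : List (List α)} {hs : List α}
    (h : rest.mapM List.head? = some hs) :
    hs = rest.map (fun r => r.getD 0 d) ∧ [] ∉ rest := by
  induction rest generalizing hs with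
  | nil => simp_all
  | cons r t ih =>
    cases r with
    | nil => simp at h
    | cons x xs =>
      simp only [List.mapM_cons, List.head?_cons] at h
      cases ht : t.mapM List.head? with
      | none => simp [ht] at h
      | some hs' =>
        simp only [ht] at h
        simp at h
        obtain ⟨h1, h2⟩ := ih ht
        subst h
        refine ⟨by simp [h1], ?_⟩
        intro hmem
        rcases List.mem_cons.mp hmem with h | h
        · exact absurd h (by simp)
        · exact h2 h

-- characterization of pyZipStarGo as indexing up to the minimum length
theorem pyZipStarGo_eq_range {α : Type} (d : α) :
    ∀ (l : List α) (rest : List (List α)),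
    pyZipStarGo l rest
      = (List.range (((l.length :: rest.map List.length).min?).getD 0)).map
          (fun i => (l :: rest).map (fun r => r.getD i d)) := by
  intro l
  induction l with
  | nil =>
    intro rest
    have h0 : (((List.nil : List α).length :: rest.map List.length).min?).getD 0 = 0 :=
      min?_getD_zero_of_mem (by simp)
    rw [pyZipStarGo, h0]
    simp
  | cons x xs ih =>
    intro rest
    simp only [pyZipStarGo]
    cases hm : rest.mapM List.head? with
    | none =>
      have hmem : [] ∈ rest := mapM_head?_eq_none.mp hm
      have h0 : (0 : Nat) ∈ ((x :: xs).length :: rest.map List.length) := by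
        refine List.mem_cons_of_mem _ ?_
        exact List.mem_map.mpr ⟨[], hmem, rfl⟩
      rw [min?_getD_zero_of_mem h0]
      simp
    | some hs =>
      obtain ⟨hhs, hne⟩ := mapM_head?_eq_some d hm
      -- lengths: every r ∈ rest nonempty, so length r = (tail r).length + 1
      have hlen : rest.map List.length = (rest.map List.tail).map (fun r => r.length + 1) := by
        rw [List.map_map]
        refine List.map_congr_left (fun r hr => ?_)
        cases r with
        | nil => exact absurd hr hne
        | cons a t => simp
      have hmin : (((x :: xs).length :: rest.map List.length).min?).getD 0
          = ((xs.length :: (rest.map List.tail).map List.length).min?).getD 0 + 1 := by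
        rw [hlen]
        have := min?_getD_map_succ xs.length ((rest.map List.tail).map List.length)
        simpa using this
      rw [hmin, List.range_succ_eq_map, List.map_cons, List.map_map]
      refine List.cons_eq_cons.mpr ⟨?_, ?_⟩
      · -- row 0
        simp only [List.map_cons, List.getD_cons_zero]
        refine congrArg _ ?_
        rw [hhs]
      · -- rows i+1
        rw [ih (rest.map List.tail)]
        refine List.map_congr_left (fun i _ => ?_)
        simp only [Function.comp_apply, List.map_cons, List.getD_cons_succ, List.map_map]
        refine congrArg _ ?_
        refine List.map_congr_left (fun r hr => ?_)
        cases r with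
        | nil => exact absurd hr hne
        | cons a t => simp

-- (l.map f).getD i d = f (l.getD i d') when i < l.length
theorem getD_map_of_lt {α β : Type} (f : α → β) (l : List α) (i : Nat) (d : β) (d' : α)
    (h : i < l.length) : (l.map f).getD i d = f (l.getD i d') := by
  rw [List.getD_eq_getElem?_getD, List.getD_eq_getElem?_getD,
    List.getElem?_map, List.getElem?_eq_getElem h]
  simp

-- merging a row of singleton dicts = folding inserts over the pairs
theorem foldl_singleton_merge (L : List (String × List Int)) (g : (String × List Int) → String × Int)
    (acc : PySem.Dict String Int) :
    (L.map (fun q => PySem.Dict.mk [g q])).foldl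
        (fun m d => d.items.foldl (fun m kv => m.insert kv.1 kv.2) m) acc
      = L.foldl (fun m q => m.insert (g q).1 (g q).2) acc := by
  induction L generalizing acc with
  | nil => rfl
  | cons q L ih => simp only [List.map_cons, List.foldl_cons]; rw [ih]; rfl

-- every value list is at least n long, where n = min?.getD 0 of the lengths
theorem lt_len_of_mem_min (spec : List (String × List Int)) (q : String × List Int)
    (hq : q ∈ spec) (i : Nat)
    (hi : i < ((spec.map (fun p => p.2.length)).min?).getD 0) : i < q.2.length := by
  have hmem : q.2.length ∈ spec.map (fun p => p.2.length) := List.mem_map.mpr ⟨q, hq, rfl⟩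
  cases hm : (spec.map (fun p => p.2.length)).min? with
  | none => simp at hm; simp [hm] at hmem
  | some m =>
    have := (List.min?_eq_some_iff.mp hm).2 _ hmem
    simp [hm] at hi
    omega

-- ===== VERDICT (by name: the statement is the Claim_ definition above) =====
theorem expand_linespec_spec : Claim_equal_expand_linespec := by
  intro spec _
  unfold Spec_expand_linespec expand_linespec expand_linespec_alt
  cases spec with
  | nil => rfl
  | cons p L =>
    simp only [List.map_cons, pyZipStar]
    rw [pyZipStarGo_eq_range (PySem.Dict.mk [("", 0)])]
    rw [List.map_map]
    have hlens : ((p.2.map (fun v => PySem.Dict.mk [(p.1, v)])).length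
        :: (L.map (fun q => q.2.map (fun v => PySem.Dict.mk [(q.1, v)]))).map List.length)
        = ((p :: L).map (fun q => q.2.length)) := by
      simp [List.map_map, Function.comp]
    rw [hlens]
    refine List.map_congr_left (fun i hi => ?_)
    have hi' : i < (((p :: L).map (fun q => q.2.length)).min?).getD 0 := List.mem_range.mp hi
    simp only [Function.comp_apply]
    have hrow : ((p.2.map (fun v => PySem.Dict.mk [(p.1, v)]))
          :: L.map (fun q => q.2.map (fun v => PySem.Dict.mk [(q.1, v)]))).map
            (fun r => r.getD i (PySem.Dict.mk [("", 0)]))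
        = (p :: L).map (fun q => PySem.Dict.mk [(q.1, q.2.getD i 0)]) := by
      rw [show ((p.2.map (fun v => PySem.Dict.mk [(p.1, v)]))
          :: L.map (fun q => q.2.map (fun v => PySem.Dict.mk [(q.1, v)])))
          = (p :: L).map (fun q => q.2.map (fun v => PySem.Dict.mk [(q.1, v)])) from rfl]
      rw [List.map_map]
      refine List.map_congr_left (fun q hq => ?_)
      exact getD_map_of_lt _ _ _ _ 0 (lt_len_of_mem_min (p :: L) q hq i hi')
    rw [hrow, foldl_singleton_merge (p :: L) (fun q => (q.1, q.2.getD i 0))]
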